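-- pv_equiv track=rewrite | github.com/LoreEkz/AI_Harmonic_Continuation | generate_dataset_no_ext.py | suggest_next
-- ===== SOURCE A (Python) =====
-- FUNCTIONS = {
--     "C": "tonic", "Am": "tonic", "Em": "tonic",
--     "F": "predominant", "Dm": "predominant",
--     "G": "dominant", "Bdim": "dominant",
-- }
--
-- MOOD_BY_FUNCTION = {
--     "tonic": "stable / floating",
--     "predominant": "gentle motion",
--     "dominant": "tension / drive",
-- }
--
-- RESOLUTION_MAP = {
--     "dominant": ["tonic"],
--     "predominant": ["dominant"],
--     "tonic": ["predominant", "dominant"]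
-- }
--
-- KEY_CHORDS = ["C", "Dm", "Em", "F", "G", "Am", "Bdim"]
--
-- def get_function(ch):
--     return FUNCTIONS.get(ch, "tonic")
--
-- def get_mood(ch):
--     return MOOD_BY_FUNCTION[get_function(ch)]
--
-- def suggest_next(prev_chord, mood_filter):
--     prev_func = get_function(prev_chord)
--     target_funcs = RESOLUTION_MAP.get(prev_func, ["tonic"])
--
--     candidates = []
--     for ch in KEY_CHORDS:
--         if get_function(ch) in target_funcs:
--             mood = get_mood(ch)
--             if mood_filter != "mixed" and mood != mood_filter:
--                 continue
--             candidates.append(ch)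
--
--     # fallback if mood too strict
--     if not candidates:
--         for ch in KEY_CHORDS:
--             if get_function(ch) in target_funcs:
--                 candidates.append(ch)
--
--     return candidates
-- ===== SOURCE B (Python) =====
-- FUNCTIONS = {
--     "C": "tonic", "Am": "tonic", "Em": "tonic",
--     "F": "predominant", "Dm": "predominant",
--     "G": "dominant", "Bdim": "dominant",
-- }
--
-- MOOD_BY_FUNCTION = {
--     "tonic": "stable / floating",
--     "predominant": "gentle motion",
--     "dominant": "tension / drive",
-- }
--
-- RESOLUTION_MAP = {
--     "dominant": ["tonic"],
--     "predominant": ["dominant"],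
--     "tonic": ["predominant", "dominant"]
-- }
--
-- KEY_CHORDS = ["C", "Dm", "Em", "F", "G", "Am", "Bdim"]
--
-- def get_function(ch):
--     return FUNCTIONS.get(ch, "tonic")
--
-- def get_mood(ch):
--     return MOOD_BY_FUNCTION[get_function(ch)]
--
-- # group index built once: harmonic function -> its chords in KEY_CHORDS order
-- FUNC_TO_CHORDS = {}
-- for _ch in KEY_CHORDS:
--     FUNC_TO_CHORDS.setdefault(get_function(_ch), []).append(_ch)
--
-- def suggest_next(prev_chord, mood_filter):
--     # Mood is determined by harmonic function alone, so the mood filter (and its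
--     # fallback) can be decided on the list of target functions; the answer is then
--     # the concatenation of the pre-grouped chord lists (correct order because each
--     # function's chords are contiguous-in-order across the chosen functions).
--     target_funcs = RESOLUTION_MAP.get(get_function(prev_chord), ["tonic"])
--     if mood_filter != "mixed":
--         kept = [f for f in target_funcs if MOOD_BY_FUNCTION[f] == mood_filter]
--         if kept:
--             target_funcs = kept
--     out = []
--     for f in target_funcs:
--         out.extend(FUNC_TO_CHORDS.get(f, []))
--     return out
-- ===== Notes on version B (the rewrite author's own statement) =====
-- stated objective: alternative
-- what changed: B builds a function-to-chords group index once at module load and answers each call by selecting target functions (applying the mood filter and its fallback at the function level, since mood depends only on harmonic function) and concatenating the pre-grouped chord lists, instead of A's per-call scan of KEY_CHORDS with a per-chord mood skip plus a second rescan on fallback.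
import Mathlib
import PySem

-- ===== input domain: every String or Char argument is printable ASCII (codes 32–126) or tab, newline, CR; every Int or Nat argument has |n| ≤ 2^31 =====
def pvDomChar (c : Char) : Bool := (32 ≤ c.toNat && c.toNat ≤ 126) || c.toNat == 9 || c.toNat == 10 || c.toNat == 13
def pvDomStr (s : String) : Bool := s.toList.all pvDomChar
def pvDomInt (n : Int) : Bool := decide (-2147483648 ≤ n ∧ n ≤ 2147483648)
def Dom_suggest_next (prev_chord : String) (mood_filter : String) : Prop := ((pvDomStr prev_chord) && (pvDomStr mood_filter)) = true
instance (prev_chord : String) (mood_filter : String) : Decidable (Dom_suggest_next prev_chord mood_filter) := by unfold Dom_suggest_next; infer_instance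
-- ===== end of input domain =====

-- B answers from a function→chords group index built once, deciding the mood filter
-- (and its fallback) per harmonic function instead of scanning KEY_CHORDS per call.

set_option maxRecDepth 4096

-- ===== PORT A =====
def pvFUNCTIONS : PySem.Dict String String :=
  PySem.Dict.ofList [("C","tonic"),("Am","tonic"),("Em","tonic"),("F","predominant"),("Dm","predominant"),("G","dominant"),("Bdim","dominant")]

def pvMOOD_BY_FUNCTION : PySem.Dict String String :=
  PySem.Dict.ofList [("tonic","stable / floating"),("predominant","gentle motion"),("dominant","tension / drive")]

def pvRESOLUTION_MAP : PySem.Dict String (List String) :=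
  PySem.Dict.ofList [("dominant",["tonic"]),("predominant",["dominant"]),("tonic",["predominant","dominant"])]

def pvKEY_CHORDS : List String := ["C","Dm","Em","F","G","Am","Bdim"]

def get_function (ch : String) : String := pvFUNCTIONS.getD ch "tonic"

-- Python indexes MOOD_BY_FUNCTION[...] with []; get_function always returns one of its
-- three keys, so the lookup never raises and .getD "" is exact here.
def get_mood (ch : String) : String := (pvMOOD_BY_FUNCTION.get? (get_function ch)).getD ""

def suggest_next (prev_chord : String) (mood_filter : String) : List String :=
  let prev_func := get_function prev_chord
  let target_funcs := pvRESOLUTION_MAP.getD prev_func ["tonic"]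
  let candidates := pvKEY_CHORDS.foldl (fun acc ch =>
    if target_funcs.contains (get_function ch) then
      let mood := get_mood ch
      if mood_filter != "mixed" && mood != mood_filter then acc
      else acc ++ [ch]
    else acc) []
  if candidates = [] then
    pvKEY_CHORDS.foldl (fun acc ch =>
      if target_funcs.contains (get_function ch) then acc ++ [ch] else acc) []
  else candidates

-- ===== PORT B =====
-- module-level group index: d.setdefault(f, []).append(ch) ≡ map f to its old list (or []) ++ [ch]
def pvFUNC_TO_CHORDS : PySem.Dict String (List String) :=
  pvKEY_CHORDS.foldl (fun d ch =>
    let f := get_function ch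
    d.insert f (((d.get? f).getD []) ++ [ch])) (PySem.Dict.ofList [])

-- B's MOOD_BY_FUNCTION[f] lookup: f comes from RESOLUTION_MAP values, always a key, so .getD "" is exact.
def suggest_next_alt (prev_chord : String) (mood_filter : String) : List String :=
  let target_funcs := pvRESOLUTION_MAP.getD (get_function prev_chord) ["tonic"]
  let target_funcs :=
    if mood_filter != "mixed" then
      let kept := target_funcs.filter (fun f => (pvMOOD_BY_FUNCTION.get? f).getD "" == mood_filter)
      if kept.isEmpty then target_funcs else kept
    else target_funcs
  target_funcs.foldl (fun out f => out ++ pvFUNC_TO_CHORDS.getD f []) []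

-- ===== PRECONDITION & SPEC =====
def Spec_suggest_next (prev_chord : String) (mood_filter : String) (out : List String) : Prop := out = suggest_next_alt prev_chord mood_filter
instance (prev_chord : String) (mood_filter : String) (out : List String) : Decidable (Spec_suggest_next prev_chord mood_filter out) := by unfold Spec_suggest_next; infer_instance

-- ===== CLAIM (what is proved, stated in full; the proofs are below) =====
def Claim_equal_suggest_next : Prop := ∀ (prev_chord : String) (mood_filter : String), Dom_suggest_next prev_chord mood_filter → Spec_suggest_next prev_chord mood_filter (suggest_next prev_chord mood_filter)

-- ===== LEMMAS AND PROOFS =====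

lemma get_function_cases (ch : String) :
    get_function ch = "tonic" ∨ get_function ch = "predominant" ∨ get_function ch = "dominant" := by
  have hitems : pvFUNCTIONS.items =
      [("C","tonic"),("Am","tonic"),("Em","tonic"),("F","predominant"),("Dm","predominant"),("G","dominant"),("Bdim","dominant")] := by decide
  unfold get_function PySem.Dict.getD PySem.Dict.get?
  rw [hitems]
  cases hf : List.find? (fun p => p.1 == ch)
      [("C","tonic"),("Am","tonic"),("Em","tonic"),("F","predominant"),("Dm","predominant"),("G","dominant"),("Bdim","dominant")] with
  | none => simp
  | some x =>
      have hx := List.mem_of_find?_eq_some hf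
      simp only [List.mem_cons, List.not_mem_nil, or_false] at hx
      rcases hx with h|h|h|h|h|h|h <;> subst h <;> simp

-- evaluation facts for the literal chords, functions and grouped lists
lemma gfC : get_function "C" = "tonic" := by decide
lemma gfDm : get_function "Dm" = "predominant" := by decide
lemma gfEm : get_function "Em" = "tonic" := by decide
lemma gfF : get_function "F" = "predominant" := by decide
lemma gfG : get_function "G" = "dominant" := by decide
lemma gfAm : get_function "Am" = "tonic" := by decide
lemma gfBdim : get_function "Bdim" = "dominant" := by decide
lemma gmC : get_mood "C" = "stable / floating" := by decide
lemma gmDm : get_mood "Dm" = "gentle motion" := by decide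
lemma gmEm : get_mood "Em" = "stable / floating" := by decide
lemma gmF : get_mood "F" = "gentle motion" := by decide
lemma gmG : get_mood "G" = "tension / drive" := by decide
lemma gmAm : get_mood "Am" = "stable / floating" := by decide
lemma gmBdim : get_mood "Bdim" = "tension / drive" := by decide
lemma rT : pvRESOLUTION_MAP.getD "tonic" ["tonic"] = ["predominant", "dominant"] := by decide
lemma rP : pvRESOLUTION_MAP.getD "predominant" ["tonic"] = ["dominant"] := by decide
lemma rD : pvRESOLUTION_MAP.getD "dominant" ["tonic"] = ["tonic"] := by decide
lemma mT : (pvMOOD_BY_FUNCTION.get? "tonic").getD "" = "stable / floating" := by decide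
lemma mP : (pvMOOD_BY_FUNCTION.get? "predominant").getD "" = "gentle motion" := by decide
lemma mD : (pvMOOD_BY_FUNCTION.get? "dominant").getD "" = "tension / drive" := by decide
lemma ftT : pvFUNC_TO_CHORDS.getD "tonic" [] = ["C", "Em", "Am"] := by decide
lemma ftP : pvFUNC_TO_CHORDS.getD "predominant" [] = ["Dm", "F"] := by decide
lemma ftD : pvFUNC_TO_CHORDS.getD "dominant" [] = ["G", "Bdim"] := by decide

lemma key_eq (prev_chord mood_filter : String) :
    suggest_next prev_chord mood_filter = suggest_next_alt prev_chord mood_filter := by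
  unfold suggest_next suggest_next_alt
  rcases get_function_cases prev_chord with h | h | h <;> rw [h] <;>
    by_cases h1 : mood_filter = "mixed" <;>
    by_cases h2 : mood_filter = "stable / floating" <;>
    by_cases h3 : mood_filter = "gentle motion" <;>
    by_cases h4 : mood_filter = "tension / drive" <;>
    first
      | (subst h1; decide)
      | (subst h2; decide)
      | (subst h3; decide)
      | (subst h4; decide)
      | (have e0 : (mood_filter == "mixed") = false := beq_eq_false_iff_ne.mpr h1
         have eS : ("stable / floating" == mood_filter) = false := beq_eq_false_iff_ne.mpr (Ne.symm h2)
         have eG : ("gentle motion" == mood_filter) = false := beq_eq_false_iff_ne.mpr (Ne.symm h3)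
         have eT : ("tension / drive" == mood_filter) = false := beq_eq_false_iff_ne.mpr (Ne.symm h4)
         simp [rT, rP, rD, pvKEY_CHORDS, List.foldl, List.filter,
               gfC, gfDm, gfEm, gfF, gfG, gfAm, gfBdim,
               gmC, gmDm, gmEm, gmF, gmG, gmAm, gmBdim,
               mT, mP, mD, ftT, ftP, ftD,
               e0, eS, eG, eT, Ne.symm h2, Ne.symm h3, Ne.symm h4, bne,
               Bool.not_false, Bool.not_true, Bool.true_and])

-- ===== VERDICT (by name: the statement is the Claim_ definition above) =====
theorem suggest_next_spec : Claim_equal_suggest_next := by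
  intro prev mood _
  exact key_eq prev mood
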